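-- pv_equiv track=rewrite | github.com/UKGANG/Leetcode | data_structure/monostack/MaxStudentOnTheStage.py | maxStudent
-- ===== SOURCE A (Python) =====
-- import collections
-- from typing import List
--
-- def maxStudent(heights: List[int], k) -> int:
--     queue = collections.deque()
--     heights.sort()
--     res = 0
--     for height in \
--             heights:
--         while queue and height - queue[0] > k:
--             queue.popleft()
--         queue.append(height)
--         res = max(res, len(queue))
--
--     return res
-- ===== SOURCE B (Python) =====
-- from typing import List
--
--
-- def _bisect_left(a, x, lo, hi):
--     # first index in [lo, hi) at which a[idx] >= x (a sorted ascending)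
--     while lo < hi:
--         mid = (lo + hi) // 2
--         if a[mid] < x:
--             lo = mid + 1
--         else:
--             hi = mid
--     return lo
--
--
-- def maxStudent(heights: List[int], k) -> int:
--     heights.sort()  # in place, matching A's side effect on the caller's list
--     res = 0
--     for j in range(len(heights)):
--         i = _bisect_left(heights, heights[j] - k, 0, j)
--         res = max(res, j - i + 1)
--     return res
-- ===== Notes on version B (the rewrite author's own statement) =====
-- stated objective: alternative
-- what changed: Replaces A's monotone-deque sliding window with a per-right-endpoint binary search (hand-written bisect_left bounded to [0,j)) into the sorted array; no queue is maintained.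
import Mathlib
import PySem

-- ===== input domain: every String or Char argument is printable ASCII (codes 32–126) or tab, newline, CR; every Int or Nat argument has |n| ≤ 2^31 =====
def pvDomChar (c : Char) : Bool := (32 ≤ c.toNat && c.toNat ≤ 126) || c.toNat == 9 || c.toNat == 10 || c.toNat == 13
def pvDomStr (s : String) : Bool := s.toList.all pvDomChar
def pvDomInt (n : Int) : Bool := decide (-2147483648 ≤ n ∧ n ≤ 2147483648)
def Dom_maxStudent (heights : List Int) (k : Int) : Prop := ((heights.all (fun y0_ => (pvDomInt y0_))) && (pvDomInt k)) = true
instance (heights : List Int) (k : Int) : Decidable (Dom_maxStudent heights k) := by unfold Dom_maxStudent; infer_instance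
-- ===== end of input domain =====

-- B replaces A's deque sliding window by a per-index binary search into the sorted list
-- (alternative algorithm, similar cost). Both Pythons sort the argument in place; the
-- equivalence proved here is about the return value.

-- ===== PORT A =====
-- while queue and height - queue[0] > k: queue.popleft()
def popLoop (h k : Int) : List Int → List Int
  | [] => []
  | q :: qs => if h - q > k then popLoop h k qs else q :: qs

def maxStudent (heights : List Int) (k : Int) : Int :=
  let s := PySem.List.sorted heights (fun x => x)
  (s.foldl (fun st height =>
      let q := popLoop height k st.1 ++ [height]
      (q, max st.2 (q.length : Int))) (([] : List Int), (0 : Int))).2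

-- ===== PORT B =====
-- hand-written binary search of Source B; every a[mid] access has mid < hi ≤ a.length at
-- all call sites, so getD is exact there
def bisectLeftLoop (a : List Int) (x : Int) (lo hi : Nat) : Nat :=
  if hlt : lo < hi then
    let mid := (lo + hi) / 2
    if a.getD mid 0 < x then bisectLeftLoop a x (mid + 1) hi
    else bisectLeftLoop a x lo mid
  else lo
termination_by hi - lo
decreasing_by all_goals omega

def maxStudent_alt (heights : List Int) (k : Int) : Int :=
  let s := PySem.List.sorted heights (fun x => x)
  (List.range s.length).foldl (fun res j =>
    let i := bisectLeftLoop s (s.getD j 0 - k) 0 j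
    max res ((j : Int) - (i : Int) + 1)) 0

-- ===== PRECONDITION & SPEC =====
def Spec_maxStudent (heights : List Int) (k : Int) (out : Int) : Prop := out = maxStudent_alt heights k
instance (heights : List Int) (k : Int) (out : Int) : Decidable (Spec_maxStudent heights k out) := by unfold Spec_maxStudent; infer_instance

-- ===== CLAIM (what is proved, stated in full; the proofs are below) =====
def Claim_equal_maxStudent : Prop := ∀ (heights : List Int) (k : Int), Dom_maxStudent heights k → Spec_maxStudent heights k (maxStudent heights k)

-- ===== LEMMAS AND PROOFS =====

-- A's queue after processing a nonempty prefix p with last element h: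
-- dropWhile (· < h - k) p.dropLast ++ [h]
def Aq (s : List Int) (k : Int) : List Int :=
  if hs : s = [] then [] else
    (s.dropLast.dropWhile (fun x => decide (x < s.getLast hs - k))) ++ [s.getLast hs]

-- B's running maximum over the first n indices of s
def Bfold (s : List Int) (k : Int) : Int :=
  (List.range s.length).foldl (fun res j =>
    let i := bisectLeftLoop s (s.getD j 0 - k) 0 j
    max res ((j : Int) - (i : Int) + 1)) 0

lemma popLoop_eq_dropWhile (h k : Int) (q : List Int) :
    popLoop h k q = q.dropWhile (fun x => decide (x < h - k)) := by
  induction q with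
  | nil => rfl
  | cons a l ih =>
    simp only [popLoop]
    by_cases hc : h - a > k
    · rw [if_pos hc, ih, List.dropWhile_cons_of_pos (by simpa using by omega)]
    · rw [if_neg hc, List.dropWhile_cons_of_neg (by simpa using by omega)]

lemma dropWhile_dropWhile {p q : Int → Bool} (himp : ∀ x, p x = true → q x = true)
    (l : List Int) : (l.dropWhile p).dropWhile q = l.dropWhile q := by
  induction l with
  | nil => rfl
  | cons a t ih =>
    by_cases hp : p a = true
    · rw [List.dropWhile_cons_of_pos hp, ih, List.dropWhile_cons_of_pos (himp a hp)]
    · rw [List.dropWhile_cons_of_neg hp]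

lemma tw_getD (p : Int → Bool) (l : List Int) :
    ∀ i, i < (l.takeWhile p).length → p (l.getD i 0) = true := by
  induction l with
  | nil => intro i hi; simp [List.takeWhile] at hi
  | cons a t ih =>
    intro i hi
    by_cases hp : p a = true
    · rw [List.takeWhile_cons_of_pos hp] at hi
      cases i with
      | zero => simpa using hp
      | succ n => simpa using ih n (by simpa using hi)
    · rw [List.takeWhile_cons_of_neg hp] at hi; simp at hi

lemma tw_stop (p : Int → Bool) (l : List Int)
    (h : (l.takeWhile p).length < l.length) :
    p (l.getD (l.takeWhile p).length 0) = false := by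
  induction l with
  | nil => simp at h
  | cons a t ih =>
    by_cases hp : p a = true
    · rw [List.takeWhile_cons_of_pos hp] at h ⊢
      simpa using ih (by simpa using h)
    · rw [List.takeWhile_cons_of_neg hp]
      simpa using hp

lemma tw_le_length (p : Int → Bool) (l : List Int) :
    (l.takeWhile p).length ≤ l.length := List.Sublist.length_le (List.takeWhile_sublist p)

lemma length_dropWhile (p : Int → Bool) (l : List Int) :
    (l.dropWhile p).length = l.length - (l.takeWhile p).length := by
  have := congrArg List.length (List.takeWhile_append_dropWhile (p := p) (l := l))
  simp only [List.length_append] at this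
  omega

lemma sorted_getD_mono {a : List Int} (hs : a.Pairwise (· ≤ ·)) {p q : Nat}
    (hpq : p ≤ q) (hq : q < a.length) : a.getD p 0 ≤ a.getD q 0 := by
  rcases Nat.eq_or_lt_of_le hpq with rfl | hlt
  · exact le_refl _
  · rw [List.getD_eq_getElem a 0 (by omega), List.getD_eq_getElem a 0 hq]
    exact (List.pairwise_iff_getElem.mp hs) p q (by omega) hq hlt

-- binary-search loop: any T bracketed by lo/hi with the cut property is the result
lemma bl_loop_eq (a : List Int) (x : Int) :
    ∀ n lo hi, hi - lo ≤ n → lo ≤ hi →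
    ∀ T, lo ≤ T → T ≤ hi →
    (∀ i, i < T → a.getD i 0 < x) →
    (∀ i, T ≤ i → i < hi → x ≤ a.getD i 0) →
    bisectLeftLoop a x lo hi = T := by
  intro n
  induction n with
  | zero =>
    intro lo hi hn hle T h1 h2 _ _
    rw [bisectLeftLoop, dif_neg (by omega)]; omega
  | succ m ih =>
    intro lo hi hn hle T h1 h2 hlo hhi
    by_cases hlt : lo < hi
    · rw [bisectLeftLoop, dif_pos hlt]
      simp only
      set mid := (lo + hi) / 2 with hmid
      have hmlo : lo ≤ mid := by omega
      have hmhi : mid < hi := by omega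
      by_cases hc : a.getD mid 0 < x
      · rw [if_pos hc]
        have hmT : mid < T := by
          by_contra hco
          exact absurd (hhi mid (by omega) hmhi) (by omega)
        exact ih (mid + 1) hi (by omega) (by omega) T (by omega) h2 hlo hhi
      · rw [if_neg hc]
        have hTm : T ≤ mid := by
          by_contra hco
          exact absurd (hlo mid (by omega)) (by omega)
        exact ih lo mid (by omega) (by omega) T h1 hTm hlo
          (fun i hTi him => hhi i hTi (by omega))
    · rw [bisectLeftLoop, dif_neg hlt]; omega

-- the loop only reads indices below hi, so appending on the right does not change it
lemma bl_append (t : List Int) (h x : Int) :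
    ∀ n lo hi, hi - lo ≤ n → hi ≤ t.length →
    bisectLeftLoop (t ++ [h]) x lo hi = bisectLeftLoop t x lo hi := by
  intro n
  induction n with
  | zero =>
    intro lo hi hn hlen
    by_cases hlt : lo < hi
    · omega
    · rw [bisectLeftLoop, dif_neg hlt, bisectLeftLoop, dif_neg hlt]
  | succ m ih =>
    intro lo hi hn hlen
    by_cases hlt : lo < hi
    · rw [bisectLeftLoop, dif_pos hlt, bisectLeftLoop, dif_pos hlt]
      simp only
      have hmid : (lo + hi) / 2 < t.length := by omega
      have hg : (t ++ [h]).getD ((lo + hi) / 2) 0 = t.getD ((lo + hi) / 2) 0 := by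
        rw [List.getD_eq_getElem _ 0 (by simp; omega), List.getD_eq_getElem t 0 hmid]
        exact List.getElem_append_left _
      rw [hg]
      by_cases hc : t.getD ((lo + hi) / 2) 0 < x
      · rw [if_pos hc, if_pos hc]; exact ih _ _ (by omega) hlen
      · rw [if_neg hc, if_neg hc]; exact ih _ _ (by omega) (by omega)
    · rw [bisectLeftLoop, dif_neg hlt, bisectLeftLoop, dif_neg hlt]

-- on a sorted list, the bounded binary search computes the takeWhile-(< x) length
lemma bl_eq_takeWhile (t : List Int) (x : Int) (hs : t.Pairwise (· ≤ ·)) :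
    bisectLeftLoop t x 0 t.length = (t.takeWhile (fun y => decide (y < x))).length := by
  set T := (t.takeWhile (fun y => decide (y < x))).length with hT
  refine bl_loop_eq t x t.length 0 t.length (by omega) (by omega) T (by omega)
    (tw_le_length _ t) ?_ ?_
  · intro i hi
    have := tw_getD (fun y => decide (y < x)) t i hi
    simpa using this
  · intro i hTi hilen
    have hTlen : T < t.length := by omega
    have hstop := tw_stop (fun y => decide (y < x)) t hTlen
    have hxT : x ≤ t.getD T 0 := by simpa using hstop
    exact le_trans hxT (sorted_getD_mono hs hTi hilen)

-- main invariant: A's fold state over a sorted list = (Aq, Bfold)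
lemma main_inv (k : Int) :
    ∀ (s : List Int), s.Pairwise (· ≤ ·) →
    (s.foldl (fun st height =>
      let q := popLoop height k st.1 ++ [height]
      (q, max st.2 (q.length : Int))) (([] : List Int), (0 : Int)))
      = (Aq s k, Bfold s k) := by
  intro s
  induction s using List.reverseRecOn with
  | nil => intro _; rfl
  | append_singleton t h ih =>
    intro hsort
    have hps := List.pairwise_append.mp hsort
    have hst : t.Pairwise (· ≤ ·) := hps.1
    have hth : ∀ x ∈ t, x ≤ h := fun x hx => hps.2.2 x hx h (by simp)
    rw [List.foldl_append, ih hst]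
    simp only [List.foldl_cons, List.foldl_nil]
    have hq : popLoop h k (Aq t k) ++ [h]
        = t.dropWhile (fun x => decide (x < h - k)) ++ [h] := by
      rw [popLoop_eq_dropWhile]
      by_cases hne : t = []
      · subst hne; rfl
      · set h' := t.getLast hne with hh'
        have hmem : h' ∈ t := List.getLast_mem hne
        have hsplit : t.dropLast ++ [h'] = t := List.dropLast_append_getLast hne
        have himp : ∀ x, (fun y => decide (y < h' - k)) x = true →
            (fun y => decide (y < h - k)) x = true := by
          intro x hx
          have h1 : x < h' - k := by simpa using hx
          have h2 : h' ≤ h := hth h' hmem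
          simpa using by omega
        rw [Aq, dif_neg hne]
        conv_rhs => rw [← hsplit]
        rw [List.dropWhile_append, List.dropWhile_append,
          dropWhile_dropWhile himp t.dropLast]
    rw [hq]
    congr 1
    · have hne2 : t ++ [h] ≠ [] := by simp
      rw [Aq, dif_neg hne2]
      simp
    · -- the running maximum
      unfold Bfold
      have hlen : (t ++ [h]).length = t.length + 1 := by simp
      rw [hlen, List.range_succ, List.foldl_append]
      simp only [List.foldl_cons, List.foldl_nil]
      have hcong : (List.range t.length).foldl
          (fun res j =>
            let i := bisectLeftLoop (t ++ [h]) ((t ++ [h]).getD j 0 - k) 0 j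
            max res ((j : Int) - (i : Int) + 1)) 0
          = Bfold t k := by
        unfold Bfold
        refine PySem.List.foldl_congr_mem _ _ _ _ ?_
        intro acc j hj
        have hjlt : j < t.length := List.mem_range.mp hj
        have hg : (t ++ [h]).getD j 0 = t.getD j 0 := by
          rw [List.getD_eq_getElem _ 0 (by simp; omega), List.getD_eq_getElem t 0 hjlt]
          exact List.getElem_append_left _
        simp only [hg, bl_append t h _ j 0 j (by omega) (by omega)]
      rw [hcong]
      congr 1
      have hgT : (t ++ [h]).getD t.length 0 = h := by
        rw [List.getD_eq_getElem _ 0 (by simp)]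
        simp
      rw [hgT, bl_append t h (h - k) t.length 0 t.length (by omega) (le_refl _),
        bl_eq_takeWhile t (h - k) hst]
      have hle := tw_le_length (fun y => decide (y < h - k)) t
      have hdw := length_dropWhile (fun y => decide (y < h - k)) t
      rw [List.length_append, hdw]
      simp only [List.length_cons, List.length_nil]
      omega

-- ===== VERDICT (by name: the statement is the Claim_ definition above) =====
theorem maxStudent_spec : Claim_equal_maxStudent := by
  intro heights k _
  unfold Spec_maxStudent maxStudent maxStudent_alt
  simp only
  rw [main_inv k (PySem.List.sorted heights (fun x => x))
    (PySem.List.sorted_pairwise heights (fun x => x))]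
  rfl
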